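-- pv_equiv track=rewrite | github.com/Yaume29/BicameriS | core/agents/super_agent.py | _infer_role
-- ===== SOURCE A (Python) =====
-- def _infer_role(task: str) -> str:
--     """Infer agent role from task"""
--     task_lower = task.lower()
--
--     if any(w in task_lower for w in ["research", "find", "search", "analyze"]):
--         return "researcher"
--     elif any(w in task_lower for w in ["write", "draft", "create content"]):
--         return "writer"
--     elif any(w in task_lower for w in ["code", "program", "build", "implement"]):
--         return "coder"
--     elif any(w in task_lower for w in ["review", "check", "validate", "test"]):
--         return "reviewer"
--     elif any(w in task_lower for w in ["design", "plan", "architecture"]):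
--         return "designer"
--     else:
--         return "assistant"
-- ===== SOURCE B (Python) =====
-- # Flat keyword -> (priority, role) index scanned exhaustively, keeping the
-- # minimum-priority match; equivalent to A's ordered short-circuit chain.
-- _KEYWORD_INFO = {
--     "research": (0, "researcher"), "find": (0, "researcher"),
--     "search": (0, "researcher"), "analyze": (0, "researcher"),
--     "write": (1, "writer"), "draft": (1, "writer"), "create content": (1, "writer"),
--     "code": (2, "coder"), "program": (2, "coder"),
--     "build": (2, "coder"), "implement": (2, "coder"),
--     "review": (3, "reviewer"), "check": (3, "reviewer"),
--     "validate": (3, "reviewer"), "test": (3, "reviewer"),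
--     "design": (4, "designer"), "plan": (4, "designer"),
--     "architecture": (4, "designer"),
-- }
--
--
-- def _infer_role(task: str) -> str:
--     """Infer agent role from task"""
--     t = task.lower()
--     best_pri, best_role = 5, "assistant"
--     for kw, (pri, role) in _KEYWORD_INFO.items():
--         if pri < best_pri and kw in t:
--             best_pri, best_role = pri, role
--     return best_role
-- ===== Notes on version B (the rewrite author's own statement) =====
-- stated objective: alternative
-- what changed: Replaces the ordered short-circuit if-elif chain of group tests with an exhaustive scan over a flat keyword->(priority,role) index that keeps the minimum-priority matching keyword (min-reduction instead of first-match control flow).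
import Mathlib
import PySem

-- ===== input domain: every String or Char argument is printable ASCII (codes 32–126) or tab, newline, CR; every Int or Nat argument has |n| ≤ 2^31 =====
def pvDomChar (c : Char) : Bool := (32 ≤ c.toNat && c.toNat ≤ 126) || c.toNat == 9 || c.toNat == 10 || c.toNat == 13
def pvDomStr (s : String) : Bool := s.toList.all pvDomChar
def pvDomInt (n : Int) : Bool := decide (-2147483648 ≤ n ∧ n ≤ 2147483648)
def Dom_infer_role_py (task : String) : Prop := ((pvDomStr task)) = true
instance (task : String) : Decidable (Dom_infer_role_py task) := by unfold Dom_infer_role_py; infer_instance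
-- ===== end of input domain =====

-- B replaces A's ordered short-circuit if-elif chain with an exhaustive scan over a
-- flat keyword -> (priority, role) index, keeping the minimum-priority match.

-- ===== PORT A =====
def infer_role_py (task : String) : String :=
  let task_lower := PySem.Str.lower task
  if ["research", "find", "search", "analyze"].any (fun w => PySem.Str.isIn w task_lower) then
    "researcher"
  else if ["write", "draft", "create content"].any (fun w => PySem.Str.isIn w task_lower) then
    "writer"
  else if ["code", "program", "build", "implement"].any (fun w => PySem.Str.isIn w task_lower) then
    "coder"
  else if ["review", "check", "validate", "test"].any (fun w => PySem.Str.isIn w task_lower) then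
    "reviewer"
  else if ["design", "plan", "architecture"].any (fun w => PySem.Str.isIn w task_lower) then
    "designer"
  else
    "assistant"

-- ===== PORT B =====
-- the flat keyword index of Source B, in dict insertion order
def pvKeywordInfo : List (String × Int × String) :=
  [("research", 0, "researcher"), ("find", 0, "researcher"),
   ("search", 0, "researcher"), ("analyze", 0, "researcher"),
   ("write", 1, "writer"), ("draft", 1, "writer"), ("create content", 1, "writer"),
   ("code", 2, "coder"), ("program", 2, "coder"),
   ("build", 2, "coder"), ("implement", 2, "coder"),
   ("review", 3, "reviewer"), ("check", 3, "reviewer"),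
   ("validate", 3, "reviewer"), ("test", 3, "reviewer"),
   ("design", 4, "designer"), ("plan", 4, "designer"),
   ("architecture", 4, "designer")]

-- one loop step of Source B: keep the entry iff it matches with a strictly smaller priority
def pvStep (t : String) (st : Int × String) (e : String × Int × String) : Int × String :=
  if e.2.1 < st.1 && PySem.Str.isIn e.1 t then (e.2.1, e.2.2) else st

def infer_role_py_alt (task : String) : String :=
  let t := PySem.Str.lower task
  (pvKeywordInfo.foldl (pvStep t) (5, "assistant")).2

-- ===== PRECONDITION & SPEC =====
def Spec_infer_role_py (task : String) (out : String) : Prop := out = infer_role_py_alt task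
instance (task : String) (out : String) : Decidable (Spec_infer_role_py task out) := by unfold Spec_infer_role_py; infer_instance

-- ===== CLAIM (what is proved, stated in full; the proofs are below) =====
def Claim_equal_infer_role_py : Prop := ∀ (task : String), Dom_infer_role_py task → Spec_infer_role_py task (infer_role_py task)

-- ===== LEMMAS AND PROOFS =====

-- folding one whole group of keywords sharing (i, role): it updates the state
-- iff the group has a match and i improves the current best priority
theorem pvFoldl_group (t : String) (kws : List String) (i : Int) (role : String)
    (st : Int × String) :
    (kws.map (fun k => (k, i, role))).foldl (pvStep t) st
      = if i < st.1 && kws.any (fun w => PySem.Str.isIn w t) then (i, role) else st := by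
  induction kws generalizing st with
  | nil => simp
  | cons k rest ih =>
    simp only [List.map_cons, List.foldl_cons, List.any_cons, pvStep, ih]
    by_cases h : PySem.Chars.isIn k.toList t.toList = true
    · by_cases hb : i < st.1
      · simp [h, hb, lt_irrefl]
      · simp [h, hb]
    · simp only [Bool.not_eq_true] at h
      simp [h]

-- the flat index is the concatenation of the five keyword groups
theorem pvKeywordInfo_groups :
    pvKeywordInfo
      = (["research", "find", "search", "analyze"].map (fun k => (k, (0 : Int), "researcher")))
        ++ (["write", "draft", "create content"].map (fun k => (k, (1 : Int), "writer")))
        ++ (["code", "program", "build", "implement"].map (fun k => (k, (2 : Int), "coder")))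
        ++ (["review", "check", "validate", "test"].map (fun k => (k, (3 : Int), "reviewer")))
        ++ (["design", "plan", "architecture"].map (fun k => (k, (4 : Int), "designer"))) := by
  rfl

-- ===== VERDICT (by name: the statement is the Claim_ definition above) =====
theorem infer_role_py_spec : Claim_equal_infer_role_py := by
  intro task _
  unfold Spec_infer_role_py infer_role_py infer_role_py_alt
  rw [pvKeywordInfo_groups]
  simp only [List.foldl_append, pvFoldl_group]
  by_cases g0 : (["research", "find", "search", "analyze"].any (fun w => PySem.Str.isIn w (PySem.Str.lower task))) = true <;>
  by_cases g1 : (["write", "draft", "create content"].any (fun w => PySem.Str.isIn w (PySem.Str.lower task))) = true <;>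
  by_cases g2 : (["code", "program", "build", "implement"].any (fun w => PySem.Str.isIn w (PySem.Str.lower task))) = true <;>
  by_cases g3 : (["review", "check", "validate", "test"].any (fun w => PySem.Str.isIn w (PySem.Str.lower task))) = true <;>
  by_cases g4 : (["design", "plan", "architecture"].any (fun w => PySem.Str.isIn w (PySem.Str.lower task))) = true <;>
  simp_all
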